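-- pv_equiv track=rewrite | github.com/MrBrantCode/unitest_baseline | mut_generate/mist_train_taco/taco_15842/solution.py | generate_beautiful_sequence
-- ===== SOURCE A (Python) =====
-- import math
--
-- def generate_beautiful_sequence(N):
--     m = int(math.sqrt(N))
--     sequence = []
--
--     # Find the divisors of N
--     for i in range(2, m + 1):
--         while N % i == 0:
--             sequence.append(N)
--             N //= i
--
--     # If N is still greater than 1, it must be a prime factor
--     if N > 1:
--         sequence.append(N)
--
--     # Append 1 to the sequence as it is always a part of the beautiful sequence
--     sequence.append(1)
--
--     # Reverse the sequence to make it strictly increasing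
--     sequence = sequence[::-1]
--
--     return sequence
-- ===== SOURCE B (Python) =====
-- def generate_beautiful_sequence(N):
--     # ascending prime factors of N by trial division with a moving bound
--     factors = []
--     n = N
--     f = 2
--     while f * f <= n:
--         while n % f == 0:
--             factors.append(f)
--             n //= f
--         f += 1
--     if n > 1:
--         factors.append(n)
--     # assemble: cumulative products of the factors taken in reverse order
--     result = [1]
--     p = 1
--     for f in reversed(factors):
--         p *= f
--         result.append(p)
--     return result
-- ===== Notes on version B (the rewrite author's own statement) =====
-- stated objective: alternative
-- what changed: B factors N by trial division with a moving bound (f*f <= current cofactor, instead of A's fixed loop bound sqrt(N)) collecting the prime factors instead of A's intermediate quotients, then assembles the answer in a separate pass as cumulative products over the reversed factor list, with no final reversal of the whole sequence.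
-- outside the precondition, e.g. on generate_beautiful_sequence(-4): A raises ValueError, B returns [1]
import Mathlib
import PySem

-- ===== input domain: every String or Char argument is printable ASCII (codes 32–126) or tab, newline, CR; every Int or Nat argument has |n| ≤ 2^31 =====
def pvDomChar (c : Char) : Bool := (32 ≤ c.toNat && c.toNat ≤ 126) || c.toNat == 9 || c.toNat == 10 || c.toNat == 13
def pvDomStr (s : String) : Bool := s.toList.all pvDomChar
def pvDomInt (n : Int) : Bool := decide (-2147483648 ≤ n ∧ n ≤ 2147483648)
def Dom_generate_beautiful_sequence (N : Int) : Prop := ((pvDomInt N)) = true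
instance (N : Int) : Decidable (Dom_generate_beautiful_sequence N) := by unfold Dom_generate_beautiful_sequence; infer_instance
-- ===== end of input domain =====

-- B factorizes recursively with a moving bound f*f ≤ current n and assembles the
-- answer as cumulative products of the reversed factor list (alternative decomposition).


-- ===== PORT A =====
-- inner loop 'while N % i == 0: sequence.append(N); N //= i'.
-- The extra guard '0 < n ∧ 1 < i' only makes the recursion total: wherever it differs
-- from the Python condition 'N % i == 0', the Python while loop does not terminate.
def pvStripA (i n : Int) (seq : List Int) : Int × List Int :=
  if h : PySem.Int.mod n i = 0 ∧ 0 < n ∧ 1 < i then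
    pvStripA i (PySem.Int.floordiv n i) (seq ++ [n])
  else (n, seq)
termination_by n.toNat
decreasing_by
  have hf : PySem.Int.floordiv n i = n / i := PySem.Int.floordiv_eq_ediv_of_pos (by omega)
  have h1 : n / i < n := by rw [Int.ediv_lt_iff_lt_mul (by omega)]; nlinarith [h.2.1, h.2.2]
  rw [hf]; omega

-- m = int(math.sqrt(N)) : exact floor of √N on the nonnegative part of the domain
-- (|N| ≤ 2^31, where the correctly rounded double sqrt truncates to ⌊√N⌋).
def generate_beautiful_sequence (N : Int) : List Int :=
  let m := Int.sqrt N
  let r := (PySem.List.pyRange 2 (m + 1) 1).foldl (fun st i => pvStripA i st.1 st.2) (N, [])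
  let seq := if r.1 > 1 then r.2 ++ [r.1] else r.2
  (seq ++ [1]).reverse  -- sequence[::-1]

-- ===== PORT B =====
-- inner while of Source B: 'while n % f == 0: factors.append(f); n //= f'.
-- 'fuel' is only a totality guard (structural recursion); the caller passes more
-- steps than the Python loop can take, so it is never exhausted where Python returns.
def pvStripB (fuel : Nat) (f n : Int) (acc : List Int) : List Int × Int :=
  match fuel with
  | 0 => (acc, n)
  | fuel + 1 =>
    if PySem.Int.mod n f = 0 then pvStripB fuel f (PySem.Int.floordiv n f) (acc ++ [f])
    else (acc, n)

-- outer while of Source B: 'while f * f <= n: <inner while>; f += 1' (same fuel convention).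
def pvOuterB (fuel : Nat) (f n : Int) (acc : List Int) : List Int × Int :=
  match fuel with
  | 0 => (acc, n)
  | fuel + 1 =>
    if f * f ≤ n then
      pvOuterB fuel (f + 1) (pvStripB (n.toNat + 1) f n acc).2 (pvStripB (n.toNat + 1) f n acc).1
    else (acc, n)

def generate_beautiful_sequence_alt (N : Int) : List Int :=
  let r := pvOuterB (N.toNat + 1) 2 N []
  let factors := if r.2 > 1 then r.1 ++ [r.2] else r.1
  (factors.reverse.foldl (fun (st : List Int × Int) f => (st.1 ++ [st.2 * f], st.2 * f)) ([1], 1)).1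

-- ===== PRECONDITION & SPEC =====
-- Pre_ excludes exactly N < 0, where A raises ValueError (math.sqrt of a negative).
def Pre_generate_beautiful_sequence (N : Int) : Prop := 0 ≤ N
instance (N : Int) : Decidable (Pre_generate_beautiful_sequence N) := by unfold Pre_generate_beautiful_sequence; infer_instance
def pvWitness_generate_beautiful_sequence : Int := 12

def Spec_generate_beautiful_sequence (N : Int) (out : List Int) : Prop := out = generate_beautiful_sequence_alt N
instance (N : Int) (out : List Int) : Decidable (Spec_generate_beautiful_sequence N out) := by unfold Spec_generate_beautiful_sequence; infer_instance

-- ===== CLAIM (what is proved, stated in full; the proofs are below) =====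
def Claim_equal_generate_beautiful_sequence : Prop := ∀ (N : Int), Dom_generate_beautiful_sequence N → Pre_generate_beautiful_sequence N → Spec_generate_beautiful_sequence N (generate_beautiful_sequence N)

-- ===== LEMMAS AND PROOFS =====

-- The common skeleton both ports reduce to: the list of successive values of n
-- (A's appended quotients) along the ascending factorization of n, divisors tried from f up.
def pvQ (f n : Int) : List Int :=
  if h : 1 < f ∧ f * f ≤ n then
    if PySem.Int.mod n f = 0 then n :: pvQ f (PySem.Int.floordiv n f)
    else pvQ (f + 1) n
  else if n > 1 then [n] else []
termination_by (n.toNat, (n + 1 - f).toNat)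
decreasing_by
  · have hf : PySem.Int.floordiv n f = n / f := PySem.Int.floordiv_eq_ediv_of_pos (by omega)
    have hn : 0 < n := by nlinarith [h.1, h.2]
    have h1 : n / f < n := by rw [Int.ediv_lt_iff_lt_mul (by omega)]; nlinarith [h.1]
    apply Prod.Lex.left; rw [hf]; omega
  · have hfn : f ≤ n := by nlinarith [h.1, h.2]
    apply Prod.Lex.right; omega

-- The ascending prime-factor list both loops produce, as one recursion (proof-side).
def pvFactor (f n : Int) : List Int :=
  if h : 1 < f ∧ f * f ≤ n then
    if PySem.Int.mod n f = 0 then f :: pvFactor f (PySem.Int.floordiv n f)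
    else pvFactor (f + 1) n
  else if n > 1 then [n] else []
termination_by (n.toNat, (n + 1 - f).toNat)
decreasing_by
  · have hf : PySem.Int.floordiv n f = n / f := PySem.Int.floordiv_eq_ediv_of_pos (by omega)
    have hn : 0 < n := by nlinarith [h.1, h.2]
    have h1 : n / f < n := by rw [Int.ediv_lt_iff_lt_mul (by omega)]; nlinarith [h.1]
    apply Prod.Lex.left; rw [hf]; omega
  · have hfn : f ≤ n := by nlinarith [h.1, h.2]
    apply Prod.Lex.right; omega

theorem pvFactor_residual (f n : Int) (h : ¬(1 < f ∧ f * f ≤ n)) :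
    pvFactor f n = if n > 1 then [n] else [] := by rw [pvFactor, dif_neg h]

-- B's assembly pass over the reversed factor list, in foldr form, produces the
-- reversed (pvQ ++ [1]) together with the running product n.
theorem pvLB (f n : Int) (hf : 1 < f) (hn : 1 ≤ n) :
    (pvFactor f n).foldr (fun x (st : List Int × Int) => (st.1 ++ [st.2 * x], st.2 * x)) ([1], 1)
      = ((pvQ f n ++ [1]).reverse, n) := by
  induction f, n using pvFactor.induct with
  | case1 f n h hmod ih =>
    rw [pvFactor, dif_pos h, if_pos hmod, pvQ, dif_pos h, if_pos hmod]
    have hfd : f ∣ n := (PySem.Int.mod_eq_zero_iff_dvd n f).1 hmod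
    obtain ⟨q, hq⟩ := hfd
    have hq' : PySem.Int.floordiv n f = q := by
      rw [PySem.Int.floordiv_eq_ediv_of_pos (by omega), hq, Int.mul_ediv_cancel_left _ (by omega)]
    have hq1 : 1 ≤ q := by nlinarith [h.1, h.2]
    rw [hq'] at ih ⊢
    rw [List.foldr_cons, ih hf hq1]
    have hqf : q * f = n := by rw [hq]; ring
    simp [hqf]
  | case2 f n h hmod ih =>
    rw [pvFactor, dif_pos h, if_neg hmod, pvQ, dif_pos h, if_neg hmod]
    exact ih (by omega) hn
  | case3 f n h h1 =>
    rw [pvFactor, dif_neg h, pvQ, dif_neg h]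
    simp [h1]
  | case4 f n h h1 =>
    rw [pvFactor, dif_neg h, pvQ, dif_neg h]
    simp [h1]; omega


-- enough fuel makes pvStripB's result fuel-independent
theorem pvStripB_irrel : ∀ (nt : Nat) (f n : Int) (acc : List Int) (u v : Nat),
    n.toNat ≤ nt → 1 ≤ n → 1 < f → n.toNat < u → n.toNat < v →
    pvStripB u f n acc = pvStripB v f n acc := by
  intro nt
  induction nt with
  | zero => intro f n acc u v hnt h1 _ _ _; exfalso; omega
  | succ nt ih =>
    intro f n acc u v hnt h1 hf hu hv
    obtain ⟨u', rfl⟩ : ∃ u', u = u' + 1 := ⟨u - 1, by omega⟩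
    obtain ⟨v', rfl⟩ : ∃ v', v = v' + 1 := ⟨v - 1, by omega⟩
    rw [pvStripB, pvStripB]
    by_cases hmod : PySem.Int.mod n f = 0
    · rw [if_pos hmod, if_pos hmod]
      have hfd : f ∣ n := (PySem.Int.mod_eq_zero_iff_dvd n f).1 hmod
      obtain ⟨q, hq⟩ := hfd
      have hq' : PySem.Int.floordiv n f = q := by
        rw [PySem.Int.floordiv_eq_ediv_of_pos (by omega), hq,
          Int.mul_ediv_cancel_left _ (by omega)]
      have hq1 : 1 ≤ q := by nlinarith
      have hqn : q < n := by nlinarith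
      rw [hq']
      exact ih f q (acc ++ [f]) u' v' (by omega) hq1 hf (by omega) (by omega)
    · rw [if_neg hmod, if_neg hmod]

-- Source B's nested while loops produce exactly acc ++ pvFactor f n (factors + residual).
theorem pvLB1 : ∀ (nt : Nat) (n : Int), n.toNat ≤ nt →
    ∀ (fuel : Nat) (f : Int) (acc : List Int),
    (n + 2 - f).toNat < fuel → 1 ≤ n → 1 < f →
    (∀ d : Int, 1 < d → d < f → ¬ d ∣ n) →
    (let r := pvOuterB fuel f n acc
     (if r.2 > 1 then r.1 ++ [r.2] else r.1)) = acc ++ pvFactor f n := by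
  intro nt
  induction nt with
  | zero => intro n hnt fuel f acc hb h1 _ _; exfalso; omega
  | succ nt ihn =>
    intro n hnt fuel
    induction fuel with
    | zero => intro f acc hb h1 hf hnd; exfalso; omega
    | succ u ihk =>
      intro f acc hb h1 hf hnd
      dsimp only
      by_cases hg : f * f ≤ n
      · by_cases hmod : PySem.Int.mod n f = 0
        · have hfd : f ∣ n := (PySem.Int.mod_eq_zero_iff_dvd n f).1 hmod
          obtain ⟨q, hq⟩ := hfd
          have hq' : PySem.Int.floordiv n f = q := by
            rw [PySem.Int.floordiv_eq_ediv_of_pos (by omega), hq,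
              Int.mul_ediv_cancel_left _ (by omega)]
          have hq1 : 1 ≤ q := by nlinarith
          have hqn : q < n := by nlinarith
          have hFn : pvFactor f n = f :: pvFactor f q := by
            conv_lhs => rw [pvFactor]
            rw [dif_pos ⟨hf, hg⟩, if_pos hmod, hq']
          -- the inner while strips one f and proceeds on the cofactor q
          have hS : pvStripB (n.toNat + 1) f n acc = pvStripB (q.toNat + 1) f q (acc ++ [f]) := by
            obtain ⟨w, hw⟩ : ∃ w, n.toNat + 1 = w + 1 := ⟨n.toNat, rfl⟩
            rw [hw, pvStripB, if_pos hmod, hq']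
            exact pvStripB_irrel q.toNat f q (acc ++ [f]) w (q.toNat + 1) (le_refl _)
              hq1 hf (by omega) (by omega)
          have hnd' : ∀ d : Int, 1 < d → d < f → ¬ d ∣ q :=
            fun d hd1 hd2 hdq => hnd d hd1 hd2 (hq ▸ hdq.mul_left f)
          by_cases hgq : f * f ≤ q
          · -- the outer loop re-enters with the same f: rejoin at (q, acc ++ [f])
            have key : pvOuterB (u + 1) f n acc = pvOuterB (u + 1) f q (acc ++ [f]) := by
              rw [pvOuterB, pvOuterB, if_pos hg, if_pos hgq, hS]
            rw [key]
            have ih := ihn q (by omega) (u + 1) f (acc ++ [f]) (by omega) hq1 hf hnd'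
            dsimp only at ih
            rw [ih, hFn]
            simp
          · by_cases hmq : PySem.Int.mod q f = 0
            · -- here q = f (no divisor of n is below f), so n = f² and the
              -- inner while runs past the outer bound, stripping both f's
              have hqf : q = f := by
                obtain ⟨r, hr⟩ := (PySem.Int.mod_eq_zero_iff_dvd q f).1 hmq
                have hrf : r < f := by nlinarith
                have hr1 : r = 1 := by
                  by_contra hne
                  have hr0 : 1 ≤ r := by nlinarith
                  exact hnd r (by omega) hrf ⟨f * f, by rw [hq, hr]; ring⟩
                rw [hr, hr1]; ring
              have hq'' : PySem.Int.floordiv q f = 1 := by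
                rw [PySem.Int.floordiv_eq_ediv_of_pos (by omega), hqf,
                  Int.ediv_self (by omega)]
              have hm1 : ¬ PySem.Int.mod 1 f = 0 := by
                rw [PySem.Int.mod_eq_zero_iff_dvd]
                intro hd
                have := Int.le_of_dvd (by norm_num) hd
                omega
              have hS2 : pvStripB (q.toNat + 1) f q (acc ++ [f]) = (acc ++ [f] ++ [f], 1) := by
                obtain ⟨w, hw⟩ : ∃ w, q.toNat = w + 1 := ⟨q.toNat - 1, by omega⟩
                rw [pvStripB, if_pos hmq, hq'', hw, pvStripB, if_neg hm1]
              have hO1 : ∀ (z : Nat), pvOuterB z (f + 1) 1 (acc ++ [f] ++ [f]) = (acc ++ [f] ++ [f], 1) := by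
                intro z
                cases z with
                | zero => rfl
                | succ z => rw [pvOuterB, if_neg (by nlinarith)]
              have key : pvOuterB (u + 1) f n acc = (acc ++ [f] ++ [f], 1) := by
                rw [pvOuterB, if_pos hg, hS, hS2]
                exact hO1 u
              rw [key]
              rw [hFn, pvFactor_residual f q (by tauto)]
              simp [hqf, hf]
            · -- one strip step, then the loop moves on to f + 1 with cofactor q
              have hS2 : pvStripB (q.toNat + 1) f q (acc ++ [f]) = (acc ++ [f], q) := by
                rw [pvStripB, if_neg hmq]
              have key : pvOuterB (u + 1) f n acc = pvOuterB u (f + 1) q (acc ++ [f]) := by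
                rw [pvOuterB, if_pos hg, hS, hS2]
              rw [key]
              have hfn : f ≤ n := by nlinarith
              have ih := ihn q (by omega) u (f + 1) (acc ++ [f]) (by omega) hq1 (by omega)
                (by
                  intro d hd1 hd2 hdq
                  rcases lt_or_eq_of_le (by omega : d ≤ f) with h | h
                  · exact hnd' d hd1 h hdq
                  · exact hmq ((PySem.Int.mod_eq_zero_iff_dvd q f).2 (h ▸ hdq)))
              dsimp only at ih
              rw [ih, hFn, pvFactor_residual f q (by tauto),
                pvFactor_residual (f + 1) q (by rintro ⟨-, hc⟩; nlinarith)]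
              simp
        · -- f does not divide n: the inner while is idle, f advances
          have hS : pvStripB (n.toNat + 1) f n acc = (acc, n) := by
            obtain ⟨w, hw⟩ : ∃ w, n.toNat + 1 = w + 1 := ⟨n.toNat, rfl⟩
            rw [hw, pvStripB, if_neg hmod]
          have key : pvOuterB (u + 1) f n acc = pvOuterB u (f + 1) n acc := by
            rw [pvOuterB, if_pos hg, hS]
          rw [key]
          have hfn : f ≤ n := by nlinarith
          have ih := ihk (f + 1) acc (by omega) h1 (by omega)
            (by
              intro d hd1 hd2 hdn
              rcases lt_or_eq_of_le (by omega : d ≤ f) with h | h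
              · exact hnd d hd1 h hdn
              · exact hmod ((PySem.Int.mod_eq_zero_iff_dvd n f).2 (h ▸ hdn)))
          dsimp only at ih
          have hFn : pvFactor f n = pvFactor (f + 1) n := by
            conv_lhs => rw [pvFactor]
            rw [dif_pos ⟨hf, hg⟩, if_neg hmod]
          rw [ih, hFn]
      · -- the outer loop is over: residual cofactor
        rw [pvOuterB, if_neg hg, pvFactor_residual f n (by tauto)]
        split_ifs <;> simp

theorem pvQ_residual (f n : Int) (h : ¬(1 < f ∧ f * f ≤ n)) :
    pvQ f n = if n > 1 then [n] else [] := by rw [pvQ, dif_neg h]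

theorem pvLA : ∀ (nt k : Nat) (n f m : Int) (seq : List Int),
    n.toNat ≤ nt → (m + 1 - f).toNat ≤ k →
    1 ≤ n → 1 < f → 0 ≤ m → f ≤ m + 1 → n < (m + 1) * (m + 1) →
    (∀ d : Int, 1 < d → d < f → ¬ d ∣ n) →
    (let r := (PySem.List.pyRange f (m + 1) 1).foldl
        (fun st i => pvStripA i st.1 st.2) (n, seq)
     (if r.1 > 1 then r.2 ++ [r.1] else r.2) = seq ++ pvQ f n) := by
  intro nt
  induction nt with
  | zero => intro k n f m seq hnt _ h1 _ _ _ _ _; exfalso; omega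
  | succ nt ihn =>
    intro k
    induction k with
    | zero =>
      intro n f m seq hnt hk h1 hf hm hfm hlt hnd
      dsimp only
      have hfe : m + 1 ≤ f := by omega
      rw [PySem.List.pyRange_one_eq_nil hfe, List.foldl_nil]
      have hguard : ¬(1 < f ∧ f * f ≤ n) := by
        rintro ⟨-, hle⟩
        have : (m + 1) * (m + 1) ≤ f * f := by nlinarith
        omega
      rw [pvQ_residual f n hguard]
      split_ifs <;> simp
    | succ k ihk =>
      intro n f m seq hnt hk h1 hf hm hfm hlt hnd
      dsimp only
      by_cases hfm2 : m + 1 ≤ f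
      · -- empty range, same as base case
        rw [PySem.List.pyRange_one_eq_nil hfm2, List.foldl_nil]
        have hguard : ¬(1 < f ∧ f * f ≤ n) := by
          rintro ⟨-, hle⟩
          have : (m + 1) * (m + 1) ≤ f * f := by nlinarith
          omega
        rw [pvQ_residual f n hguard]
        split_ifs <;> simp
      · have hcons : PySem.List.pyRange f (m + 1) 1 = f :: PySem.List.pyRange (f + 1) (m + 1) 1 :=
          PySem.List.pyRange_one_cons (by omega)
        by_cases hmod : PySem.Int.mod n f = 0
        · -- f divides n: one strip step, restart the loop at (q, seq ++ [n])
          have hfd : f ∣ n := (PySem.Int.mod_eq_zero_iff_dvd n f).1 hmod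
          obtain ⟨q, hq⟩ := hfd
          have hq' : PySem.Int.floordiv n f = q := by
            rw [PySem.Int.floordiv_eq_ediv_of_pos (by omega), hq,
              Int.mul_ediv_cancel_left _ (by omega)]
          have hq1 : 1 ≤ q := by nlinarith
          have hqn : q < n := by nlinarith
          have hstep : pvStripA f n seq = pvStripA f q (seq ++ [n]) := by
            rw [pvStripA, dif_pos ⟨hmod, by omega, hf⟩, hq']
          have hfold :
              (PySem.List.pyRange f (m + 1) 1).foldl
                  (fun st i => pvStripA i st.1 st.2) (n, seq)
                = (PySem.List.pyRange f (m + 1) 1).foldl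
                  (fun st i => pvStripA i st.1 st.2) (q, seq ++ [n]) := by
            rw [hcons, List.foldl_cons, List.foldl_cons]
            dsimp only
            rw [hstep]
          rw [hfold]
          have hnd' : ∀ d : Int, 1 < d → d < f → ¬ d ∣ n := hnd
          have ih := ihn ((m + 1 - f).toNat) q f m (seq ++ [n]) (by omega) (le_refl _)
            hq1 hf hm hfm (by omega)
            (fun d hd1 hd2 hdq => hnd d hd1 hd2 (hq ▸ hdq.mul_left f))
          dsimp only at ih
          have hQ : pvQ f n = n :: pvQ f q := by
            by_cases hff : f * f ≤ n
            · conv_lhs => rw [pvQ]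
              rw [dif_pos ⟨hf, hff⟩, if_pos hmod, hq']
            · -- here n = f and q = 1
              have hqf : q < f := by nlinarith
              have hq1' : q = 1 := by
                by_contra hne
                exact hnd q (by omega) hqf ⟨f, by rw [hq]; ring⟩
              have hnf : n = f := by rw [hq, hq1']; ring
              rw [pvQ_residual f n (by tauto), hq1',
                pvQ_residual f 1 (by rintro ⟨-, h4⟩; nlinarith)]
              simp [show n > 1 by omega]
          rw [ih, hQ]
          simp
        · -- f does not divide n: idle iteration
          have hstep : pvStripA f n seq = (n, seq) := by
            rw [pvStripA, dif_neg (by tauto)]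
          rw [hcons, List.foldl_cons]
          dsimp only
          rw [hstep]
          have ih := ihk n (f + 1) m seq hnt (by omega) h1 (by omega) hm (by omega) hlt
            (by
              intro d hd1 hd2 hdn
              rcases lt_or_eq_of_le (by omega : d ≤ f) with h | h
              · exact hnd d hd1 h hdn
              · exact hmod ((PySem.Int.mod_eq_zero_iff_dvd n f).2 (h ▸ hdn)))
          dsimp only at ih
          have hQ : pvQ f n = pvQ (f + 1) n := by
            by_cases hff : f * f ≤ n
            · conv_lhs => rw [pvQ]
              rw [dif_pos ⟨hf, hff⟩, if_neg hmod]
            · rw [pvQ_residual f n (by tauto),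
                pvQ_residual (f + 1) n (by rintro ⟨-, h4⟩; nlinarith)]
          rw [ih, hQ]

-- ===== VERDICT (by name: the statement is the Claim_ definition above) =====
theorem generate_beautiful_sequence_spec : Claim_equal_generate_beautiful_sequence := by
  intro N _ hN
  unfold Spec_generate_beautiful_sequence
  rcases eq_or_lt_of_le hN with h0 | hpos
  · -- N = 0 : both sides are [1]
    have e1 : generate_beautiful_sequence 0 = [1] := by
      unfold generate_beautiful_sequence
      rw [show Int.sqrt 0 = 0 from by simp [Int.sqrt]]
      dsimp only
      rw [PySem.List.pyRange_one_eq_nil (by norm_num)]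
      simp
    have e2 : generate_beautiful_sequence_alt 0 = [1] := by
      unfold generate_beautiful_sequence_alt
      rw [pvOuterB]
      simp
    rw [← h0, e1, e2]
  · -- N ≥ 1
    have hpos' : 1 ≤ N := hpos
    have hm0 : 0 ≤ Int.sqrt N := Int.sqrt_nonneg N
    have hmdef : Int.sqrt N = ((Nat.sqrt N.toNat : Nat) : Int) := by simp [Int.sqrt]
    have hm1 : 1 ≤ Int.sqrt N := by
      rw [hmdef]
      have : 0 < Nat.sqrt N.toNat := by
        rw [Nat.sqrt_pos]
        omega
      omega
    have hlt : N < (Int.sqrt N + 1) * (Int.sqrt N + 1) := by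
      rw [hmdef]
      have h1 := Nat.lt_succ_sqrt N.toNat
      have hNt : N = (N.toNat : Int) := (Int.toNat_of_nonneg hN).symm
      rw [hNt]
      exact_mod_cast h1
    have hA := pvLA N.toNat (Int.sqrt N + 1 - 2).toNat N 2 (Int.sqrt N) []
      (le_refl _) (le_refl _) hpos' (by norm_num) hm0 (by omega) hlt
      (by intro d hd1 hd2 _; omega)
    dsimp only at hA
    unfold generate_beautiful_sequence
    dsimp only
    rw [hA]
    have hB := pvLB1 N.toNat N (le_refl _) (N.toNat + 1) 2 [] (by omega) hpos'
      (by norm_num) (by intro d hd1 hd2 _; omega)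
    dsimp only at hB
    unfold generate_beautiful_sequence_alt
    dsimp only
    rw [hB]
    simp only [List.nil_append, List.foldl_reverse]
    rw [pvLB 2 N (by norm_num) hpos']
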